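-- pv_equiv track=rewrite | github.com/SJY8460/ECLM | utils.py | convert_dict_to_slots_old
-- ===== SOURCE A (Python) =====
-- def convert_dict_to_slots_old(entity_slots, sentence):
--     words = sentence.split()
--     slot_sequence = ['O'] * len(words)  # 初始化槽位序列为全'O'
--
--     for slot_type, slot_value in entity_slots.items():
--         if slot_value:
--             slot_words = slot_value.split()
--             start_index = find_sublist_index(slot_words, words)
--
--             if start_index != -1:
--                 # 标记B类型槽位
--                 slot_sequence[start_index] = f"B-{slot_type}"
--                 # 标记随后的I类型槽位
--                 for i in range(start_index + 1, start_index + len(slot_words)):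
--                     slot_sequence[i] = f"I-{slot_type}"
--
--     return slot_sequence
--
-- def find_sublist_index(sublist, lst, start_index=0):
--     for i in range(start_index, len(lst) - len(sublist) + 1):
--         if sublist == lst[i:i + len(sublist)]:
--             return i
--     return -1
-- ===== SOURCE B (Python) =====
-- def convert_dict_to_slots_old(entity_slots, sentence):
--     words = sentence.split()
--     # word -> sorted list of its positions, built once
--     positions = {}
--     for i, w in enumerate(words):
--         positions.setdefault(w, []).append(i)
--     slot_sequence = ['O'] * len(words)
--     for slot_type, slot_value in entity_slots.items():
--         slot_words = slot_value.split()
--         if not slot_words: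
--             continue
--         m = len(slot_words)
--         for i in positions.get(slot_words[0], []):
--             if words[i:i + m] == slot_words:
--                 tags = [f"B-{slot_type}"] + [f"I-{slot_type}"] * (m - 1)
--                 slot_sequence = slot_sequence[:i] + tags + slot_sequence[i + m:]
--                 break
--     return slot_sequence
-- ===== Notes on version B (the rewrite author's own statement) =====
-- stated objective: alternative
-- what changed: B builds a word-to-positions index of the sentence once and, per slot phrase, checks only the positions of the phrase's first word (splicing the tag block in by slicing) instead of A's scan of every start position with a slice comparison at each; Pre_ excludes duplicate-key association lists (no dict corresponds to them) and the inputs where A raises IndexError.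
-- intended difference: On inputs whose sentence has words and where the last slot writing word position 0 is one whose value is truthy but splits to no words, A leaves a spurious B-<type> tag at position 0 for a phrase that is not in the sentence, while B gives position 0 its correct tag; skipping a wordless phrase is the intended behaviour. — e.g. on convert_dict_to_slots_old([("t", " ")], "a"): A returns ["B-t"], B returns ["O"]
import Mathlib
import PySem

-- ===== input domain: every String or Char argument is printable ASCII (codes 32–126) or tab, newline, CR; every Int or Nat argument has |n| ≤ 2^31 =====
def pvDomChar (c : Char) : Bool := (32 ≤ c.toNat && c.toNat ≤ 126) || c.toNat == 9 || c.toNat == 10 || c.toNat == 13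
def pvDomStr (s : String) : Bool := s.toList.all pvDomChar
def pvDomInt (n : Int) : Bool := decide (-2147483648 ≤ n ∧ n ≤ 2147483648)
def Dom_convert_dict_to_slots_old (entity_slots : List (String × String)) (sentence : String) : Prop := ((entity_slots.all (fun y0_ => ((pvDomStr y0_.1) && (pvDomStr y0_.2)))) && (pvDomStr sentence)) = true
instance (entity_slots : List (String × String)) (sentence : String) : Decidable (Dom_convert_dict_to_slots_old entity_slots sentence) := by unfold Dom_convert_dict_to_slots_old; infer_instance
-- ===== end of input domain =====

-- B replaces A's per-slot scan over every start position by a word→positions index built once,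
-- checking only the positions where the slot phrase's first word occurs (objective: alternative algorithm).

-- ===== PORT A =====

-- slot_sequence[i] = v.  Wherever A returns, the index is in range (Pre_ excludes A's only
-- IndexError); out of range Python raises, here the list is kept unchanged.
def pySetItem (seq : List String) (i : Int) (v : String) : List String :=
  (PySem.List.pySet? seq i v).getD seq

-- for i in range(start_index, len(lst) - len(sublist) + 1):
--     if sublist == lst[i:i + len(sublist)]: return i
-- return -1        (the early return of the scan = List.find? over the range)
def find_sublist_index (sublist : List String) (lst : List String) (start_index : Int) : Int :=
  match (PySem.List.pyRange start_index ((lst.length : Int) - (sublist.length : Int) + 1)).find?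
      (fun i => sublist == PySem.List.slice lst (some i) (some (i + (sublist.length : Int)))) with
  | some i => i
  | none => -1

def convert_dict_to_slots_old (entity_slots : List (String × String)) (sentence : String) : List String :=
  let words := PySem.Str.split₀ sentence
  let slot_sequence := List.replicate words.length "O"
  entity_slots.foldl (fun slot_sequence p =>
    if p.2 ≠ "" then
      let slot_words := PySem.Str.split₀ p.2
      let start_index := find_sublist_index slot_words words 0
      if start_index ≠ -1 then
        let seq1 := pySetItem slot_sequence start_index ("B-" ++ p.1)
        (PySem.List.pyRange (start_index + 1) (start_index + (slot_words.length : Int))).foldl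
          (fun sq i => pySetItem sq i ("I-" ++ p.1)) seq1
      else slot_sequence
    else slot_sequence) slot_sequence

-- ===== PORT B =====

def convert_dict_to_slots_old_alt (entity_slots : List (String × String)) (sentence : String) : List String :=
  let words := PySem.Str.split₀ sentence
  let positions : PySem.Dict String (List Int) :=
    (PySem.List.enumerate words).foldl (fun d p => d.modify p.2 [] (· ++ [p.1])) PySem.Dict.empty
  entity_slots.foldl (fun slot_sequence p =>
    match PySem.Str.split₀ p.2 with
    | [] => slot_sequence
    | w :: rest =>
      let m := (w :: rest).length
      -- for i in positions.get(slot_words[0], []): if words[i:i+m]==slot_words: splice; break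
      match (positions.getD w []).find?
          (fun i => PySem.List.slice words (some i) (some (i + (m : Int))) == w :: rest) with
      | none => slot_sequence
      | some i =>
        PySem.List.slice slot_sequence none (some i)
          ++ (("B-" ++ p.1) :: List.replicate (m - 1) ("I-" ++ p.1))
          ++ PySem.List.slice slot_sequence (some (i + (m : Int))) none)
    (List.replicate words.length "O")

-- ===== PRECONDITION & SPEC =====
-- Pre_ excludes (a) association lists with duplicate slot-type keys, which correspond to no
-- Python dict input (the dict collapses them, so the list form is ambiguous), and (b) the inputs
-- where A raises IndexError: an empty word list together with a truthy whitespace-only slot value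
-- (find_sublist_index returns 0 and slot_sequence[0] fails).
def Pre_convert_dict_to_slots_old (entity_slots : List (String × String)) (sentence : String) : Prop :=
  (entity_slots.map Prod.fst).Nodup ∧
  (PySem.Str.split₀ sentence = [] →
    ∀ p ∈ entity_slots, p.2 ≠ "" → PySem.Str.split₀ p.2 ≠ [])
instance (entity_slots : List (String × String)) (sentence : String) : Decidable (Pre_convert_dict_to_slots_old entity_slots sentence) := by unfold Pre_convert_dict_to_slots_old; infer_instance

def pvWitness_convert_dict_to_slots_old : (List (String × String)) × String :=
  ([("city", "new york"), ("food", "")], "i live in new york")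

-- a slot whose phrase is a prefix of the sentence (its BIO block starts at word 0)
def pvPhrasePrefix (words : List String) (p : String × String) : Bool :=
  PySem.Str.split₀ p.2 != [] && (PySem.Str.split₀ p.2).isPrefixOf words

-- a slot that makes A write word position 0: a truthy wordless value, or a prefix phrase
def pvWrites0 (words : List String) (p : String × String) : Bool :=
  p.2 != "" && (PySem.Str.split₀ p.2 == [] || pvPhrasePrefix words p)

-- On inputs whose sentence has words and where the last slot writing word position 0 is one whose
-- value is truthy but splits to no words, A leaves a spurious B-<type> tag at position 0 for a
-- phrase that is not there, while B gives position 0 its correct tag; skipping a wordless phrase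
-- is the intended behaviour.
def D_convert_dict_to_slots_old (entity_slots : List (String × String)) (sentence : String) : Prop :=
  PySem.Str.split₀ sentence ≠ [] ∧
    ((entity_slots.filter (pvWrites0 (PySem.Str.split₀ sentence))).getLast?.any (fun p =>
      PySem.Str.split₀ p.2 == [])) = true
instance (entity_slots : List (String × String)) (sentence : String) : Decidable (D_convert_dict_to_slots_old entity_slots sentence) := by unfold D_convert_dict_to_slots_old; infer_instance

def Spec_convert_dict_to_slots_old (entity_slots : List (String × String)) (sentence : String) (out : List String) : Prop := ¬ D_convert_dict_to_slots_old entity_slots sentence → out = convert_dict_to_slots_old_alt entity_slots sentence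
instance (entity_slots : List (String × String)) (sentence : String) (out : List String) : Decidable (Spec_convert_dict_to_slots_old entity_slots sentence out) := by unfold Spec_convert_dict_to_slots_old; infer_instance

def pvDiffWitness_convert_dict_to_slots_old : (List (String × String)) × String := ([("t", " ")], "a")
def pvDiffWitnessOut_convert_dict_to_slots_old : (List String) × (List String) := (["B-t"], ["O"])

-- ===== CLAIM (what is proved, stated in full; the proofs are below) =====
def Claim_unchanged_convert_dict_to_slots_old : Prop := ∀ (entity_slots : List (String × String)) (sentence : String), Dom_convert_dict_to_slots_old entity_slots sentence → Pre_convert_dict_to_slots_old entity_slots sentence → Spec_convert_dict_to_slots_old entity_slots sentence (convert_dict_to_slots_old entity_slots sentence)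
def Claim_changed_convert_dict_to_slots_old : Prop := Dom_convert_dict_to_slots_old (pvDiffWitness_convert_dict_to_slots_old.1) (pvDiffWitness_convert_dict_to_slots_old.2) ∧ Pre_convert_dict_to_slots_old (pvDiffWitness_convert_dict_to_slots_old.1) (pvDiffWitness_convert_dict_to_slots_old.2) ∧ D_convert_dict_to_slots_old (pvDiffWitness_convert_dict_to_slots_old.1) (pvDiffWitness_convert_dict_to_slots_old.2) ∧ convert_dict_to_slots_old (pvDiffWitness_convert_dict_to_slots_old.1) (pvDiffWitness_convert_dict_to_slots_old.2) = pvDiffWitnessOut_convert_dict_to_slots_old.1 ∧ convert_dict_to_slots_old_alt (pvDiffWitness_convert_dict_to_slots_old.1) (pvDiffWitness_convert_dict_to_slots_old.2) = pvDiffWitnessOut_convert_dict_to_slots_old.2 ∧ pvDiffWitnessOut_convert_dict_to_slots_old.1 ≠ pvDiffWitnessOut_convert_dict_to_slots_old.2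
def Claim_exact_convert_dict_to_slots_old : Prop := ∀ (entity_slots : List (String × String)) (sentence : String), Dom_convert_dict_to_slots_old entity_slots sentence → Pre_convert_dict_to_slots_old entity_slots sentence → D_convert_dict_to_slots_old entity_slots sentence → convert_dict_to_slots_old entity_slots sentence ≠ convert_dict_to_slots_old_alt entity_slots sentence

-- ===== LEMMAS AND PROOFS =====

theorem cand_char (l : List String) (s : Int) (w : String) :
    ((PySem.List.enumerate l s).filter (fun p => p.2 == w)).map (fun p => p.1)
      = ((List.range l.length).filter (fun k => l.getD k "" == w)).map (fun (k : Nat) => s + (k : Int)) := by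
  induction l generalizing s with
  | nil => simp [PySem.List.enumerate]
  | cons x t ih =>
    simp only [PySem.List.enumerate, List.length_cons, List.range_succ_eq_map, List.filter_cons]
    by_cases hx : x = w
    · simp only [hx, beq_self_eq_true, if_pos, List.map_cons, List.getD_cons_zero,
        List.filter_map, List.map_map, ih]
      simp [Function.comp_def]
      intro a _ _; ring
    · simp only [List.getD_cons_zero]
      rw [if_neg (by simpa using hx), ih]
      simp [(by simpa using hx : (x == w) = false), List.filter_map, Function.comp_def]
      intro a _ _; ring

def posDict (words : List String) : PySem.Dict String (List Int) :=
  (PySem.List.enumerate words 0).foldl (fun d p => d.modify p.2 [] (· ++ [p.1])) PySem.Dict.empty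

def candList (words : List String) (w : String) : List Int :=
  ((List.range words.length).filter (fun k => words.getD k "" == w)).map (fun (k : Nat) => (k : Int))

theorem posDict_getD (words : List String) (w : String) :
    (posDict words).getD w [] = candList words w := by
  have h : posDict words
      = ((PySem.List.enumerate words 0).map (fun p => (p.2, p.1))).foldl
          (fun d q => d.modify q.1 [] (· ++ [q.2])) PySem.Dict.empty := by
    rw [List.foldl_map]; rfl
  rw [h, PySem.Dict.getD_foldl_modify_append]
  have h2 : PySem.Dict.getD (PySem.Dict.empty) w ([] : List Int) = [] := by rfl
  rw [h2]
  simp only [List.filter_map, List.map_map, List.nil_append]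
  have := cand_char words 0 w
  simp only [Function.comp_def] at this ⊢
  rw [this]
  simp [candList]

theorem find?_eq_of_sorted (l1 l2 : List Int) (P : Int → Bool)
    (h1 : List.Pairwise (· < ·) l1) (h2 : List.Pairwise (· < ·) l2)
    (hiff : ∀ i, P i = true → (i ∈ l1 ↔ i ∈ l2)) : l1.find? P = l2.find? P := by
  rw [← List.head?_filter, ← List.head?_filter]
  have hf1 : List.Pairwise (· < ·) (l1.filter P) := h1.filter _
  have hf2 : List.Pairwise (· < ·) (l2.filter P) := h2.filter _
  have heq : l1.filter P = l2.filter P := by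
    have hperm : (l2.filter P).Perm (l1.filter P) := by
      rw [List.perm_ext_iff_of_nodup (hf2.imp ne_of_lt) (hf1.imp ne_of_lt)]
      intro a
      simp only [List.mem_filter]
      constructor
      · rintro ⟨ha, hp⟩; exact ⟨(hiff a hp).2 ha, hp⟩
      · rintro ⟨ha, hp⟩; exact ⟨(hiff a hp).1 ha, hp⟩
    have e1 : PySem.List.sorted (l1.filter P) id = l1.filter P :=
      PySem.List.sorted_eq_of_perm_of_pairwise_lt _ _ id (List.Perm.refl _) hf1
    have e2 : PySem.List.sorted (l1.filter P) id = l2.filter P :=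
      PySem.List.sorted_eq_of_perm_of_pairwise_lt _ _ id hperm hf2
    rw [← e1, e2]
  rw [heq]

-- what a successful slice comparison implies about the index

theorem slice_hit (words : List String) (w : String) (rest : List String) (i : Int) (hi : 0 ≤ i)
    (hP : PySem.List.slice words (some i) (some (i + ((w :: rest).length : Int))) = w :: rest) :
    i.toNat + (w :: rest).length ≤ words.length ∧ words.getD i.toNat "" = w := by
  set m := (w :: rest).length with hm
  have hcast : i = ((i.toNat : Nat) : Int) := by omega
  rw [hcast] at hP
  have h2 : ((i.toNat : Nat) : Int) + (m : Int) = ((i.toNat + m : Nat) : Int) := by push_cast; ring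
  rw [h2, PySem.List.slice_natCast] at hP
  have hlen := congrArg List.length hP
  simp only [List.length_take, List.length_drop] at hlen
  have hm1 : 1 ≤ m := by simp [hm]
  have hmn : i.toNat + m ≤ words.length := by omega
  refine ⟨hmn, ?_⟩
  have hk : i.toNat < words.length := by omega
  have hdrop : words.drop i.toNat = words[i.toNat] :: words.drop (i.toNat + 1) :=
    List.drop_eq_getElem_cons hk
  rw [hdrop] at hP
  have hm' : m = rest.length + 1 := by simp [hm]
  rw [hm'] at hP
  have hc : i.toNat + (rest.length + 1) - i.toNat = rest.length + 1 := by omega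
  rw [hc, List.take_succ_cons] at hP
  rw [List.getD_eq_getElem _ _ hk]
  exact ((List.cons.injEq _ _ _ _) ▸ hP : _ ∧ _).1

theorem start_eq (words : List String) (w : String) (rest : List String) :
    find_sublist_index (w :: rest) words 0
      = (((posDict words).getD w []).find?
          (fun i => PySem.List.slice words (some i) (some (i + (((w :: rest).length : Nat) : Int))) == w :: rest)).getD (-1) := by
  rw [posDict_getD]
  have hfun : (fun i => ((w :: rest) == PySem.List.slice words (some i) (some (i + (((w :: rest).length : Nat) : Int)))))
      = (fun i => PySem.List.slice words (some i) (some (i + (((w :: rest).length : Nat) : Int))) == w :: rest) := by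
    funext i; exact Bool.beq_comm
  have hrange : PySem.List.pyRange 0 ((words.length : Int) - ((w :: rest).length : Int) + 1)
      = (List.range ((words.length : Int) - ((w :: rest).length : Int) + 1).toNat).map (fun (k : Nat) => (k : Int)) := by
    by_cases h : ((words.length : Int) - ((w :: rest).length : Int) + 1) ≤ 0
    · rw [PySem.List.pyRange_one_eq_nil h]
      have h0 : ((words.length : Int) - ((w :: rest).length : Int) + 1).toNat = 0 := by omega
      rw [h0]; rfl
    · rw [← Int.toNat_of_nonneg (by omega : 0 ≤ (words.length : Int) - ((w :: rest).length : Int) + 1), PySem.List.pyRange_zero_natCast]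
      congr 2
  have hpair1 : List.Pairwise (· < ·) (PySem.List.pyRange 0 ((words.length : Int) - ((w :: rest).length : Int) + 1)) := by
    rw [hrange]
    exact (List.pairwise_lt_range).map _ (by intro a b hab; exact_mod_cast hab)
  have hpair2 : List.Pairwise (· < ·) (candList words w) := by
    unfold candList
    exact ((List.pairwise_lt_range).filter _).map _ (by intro a b hab; exact_mod_cast hab)
  have hiff : ∀ i, (PySem.List.slice words (some i) (some (i + (((w :: rest).length : Nat) : Int))) == w :: rest) = true →
      (i ∈ PySem.List.pyRange 0 ((words.length : Int) - ((w :: rest).length : Int) + 1) ↔ i ∈ candList words w) := by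
    intro i hPi
    rw [beq_iff_eq] at hPi
    by_cases hi : 0 ≤ i
    · obtain ⟨h1, h2⟩ := slice_hit words w rest i hi hPi
      constructor
      · intro _
        unfold candList
        simp only [List.mem_map, List.mem_filter, List.mem_range]
        refine ⟨i.toNat, ⟨by simp at h1 ⊢; omega, by simpa [List.getD] using h2⟩, by omega⟩
      · intro _
        rw [PySem.List.mem_pyRange_one]
        refine ⟨hi, by simp at h1 ⊢; omega⟩
    · constructor
      · intro hmem; rw [PySem.List.mem_pyRange_one] at hmem; omega
      · intro hmem
        unfold candList at hmem
        simp only [List.mem_map, List.mem_filter, List.mem_range] at hmem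
        obtain ⟨k, _, hk⟩ := hmem
        omega
  have hfind := find?_eq_of_sorted _ _ _ hpair1 hpair2 hiff
  unfold find_sublist_index
  rw [hfun, hfind]
  cases (candList words w).find? (fun i => PySem.List.slice words (some i) (some (i + (((w :: rest).length : Nat) : Int))) == w :: rest) with
  | none => rfl
  | some v => rfl

theorem pySetItem_natCast (seq : List String) (k : Nat) (v : String) (h : k < seq.length) :
    pySetItem seq (k : Int) v = seq.set k v := by
  unfold pySetItem
  rw [PySem.List.pySet?_natCast seq k v h]
  rfl

-- the I-tag loop writes a replicate block

theorem tag_fold (tag : String) : ∀ (c : Nat) (seq : List String) (a : Nat), a + c ≤ seq.length →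
    (PySem.List.pyRange (a : Int) ((a : Int) + (c : Int))).foldl (fun sq i => pySetItem sq i tag) seq
      = seq.take a ++ List.replicate c tag ++ seq.drop (a + c) := by
  intro c
  induction c with
  | zero =>
    intro seq a h
    rw [show ((a : Int) + ((0:Nat) : Int)) = (a : Int) by simp]
    rw [PySem.List.pyRange_one_eq_nil (le_refl _)]
    simp
  | succ c ih =>
    intro seq a h
    rw [show ((a : Int) + ((c+1 : Nat) : Int)) = ((a : Int) + (c : Int)) + 1 by push_cast; ring]
    rw [PySem.List.pyRange_one_succ_right (by omega : (a : Int) ≤ (a : Int) + (c : Int))]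
    rw [List.foldl_append]
    rw [ih seq a (by omega)]
    rw [show ((a : Int) + (c : Int)) = ((a + c : Nat) : Int) by push_cast; ring]
    simp only [List.foldl_cons, List.foldl_nil]
    have hlt : a + c < (seq.take a ++ List.replicate c tag ++ seq.drop (a + c)).length := by
      simp [List.length_take, List.length_drop]
      omega
    rw [pySetItem_natCast _ _ _ hlt]
    have hdrop : seq.drop (a + c) = seq[a + c] :: seq.drop (a + c + 1) :=
      List.drop_eq_getElem_cons (by omega)
    rw [hdrop]
    have hlen2 : (seq.take a ++ List.replicate c tag).length = a + c := by
      simp [List.length_take]; omega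
    rw [List.append_assoc, List.set_append_right _ _ (by simp [List.length_take])]
    have hta : (List.take a seq).length = a := by simp; omega
    rw [hta, show a + c - a = c by omega, List.set_append_right _ _ (by simp), List.length_replicate,
      show c - c = 0 by omega, List.set_cons_zero]
    simp [List.replicate_succ', List.append_assoc, show a + c + 1 = a + (c+1) by omega]

theorem tagged_eq (words seq : List String) (w : String) (rest : List String) (bt it : String)
    (s : Int) (hs0 : 0 ≤ s) (hlen : seq.length = words.length)
    (hbound : s.toNat + (w :: rest).length ≤ words.length) :
    (PySem.List.pyRange (s + 1) (s + ((w :: rest).length : Int))).foldl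
        (fun sq i => pySetItem sq i it) (pySetItem seq s bt)
    = PySem.List.slice seq none (some s) ++ (bt :: List.replicate ((w :: rest).length - 1) it)
        ++ PySem.List.slice seq (some (s + ((w :: rest).length : Int))) none := by
  have hm : (w :: rest).length = rest.length + 1 := by simp
  have hkl : s.toNat < seq.length := by simp [hm] at hbound; omega
  rw [show s = ((s.toNat : Nat) : Int) by omega]
  rw [pySetItem_natCast _ _ _ hkl]
  rw [show (((s.toNat : Nat) : Int) + 1) = ((s.toNat + 1 : Nat) : Int) by push_cast; ring]
  rw [show (((s.toNat : Nat) : Int) + ((w :: rest).length : Int)) = ((s.toNat + 1 : Nat) : Int) + ((rest.length : Nat) : Int) by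
    rw [hm]; push_cast; ring]
  rw [tag_fold it rest.length (seq.set s.toNat bt) (s.toNat + 1) (by simp [hm] at hbound ⊢; omega)]
  rw [List.set_eq_take_cons_drop _ hkl]
  rw [PySem.List.slice_to _ (by omega : (0:Int) ≤ ((s.toNat : Nat) : Int))]
  rw [show (((s.toNat + 1 : Nat) : Int) + ((rest.length : Nat) : Int)) = ((s.toNat + 1 + rest.length : Nat) : Int) by push_cast; ring]
  rw [PySem.List.slice_from _ (by omega : (0:Int) ≤ ((s.toNat + 1 + rest.length : Nat) : Int))]
  rw [Int.toNat_natCast, Int.toNat_natCast]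
  have e1 : List.take (s.toNat + 1) (List.take s.toNat seq ++ bt :: List.drop (s.toNat + 1) seq)
      = List.take s.toNat seq ++ [bt] := by
    rw [List.take_append, List.take_take, show min (s.toNat + 1) s.toNat = s.toNat from by omega,
      show s.toNat + 1 - (List.take s.toNat seq).length = 1 from by simp; omega,
      List.take_succ_cons, List.take_zero]
  have e2 : List.drop (s.toNat + 1 + rest.length) (List.take s.toNat seq ++ bt :: List.drop (s.toNat + 1) seq)
      = List.drop (s.toNat + 1 + rest.length) seq := by
    rw [List.drop_append,
      List.drop_eq_nil_of_le (show (List.take s.toNat seq).length ≤ s.toNat + 1 + rest.length by simp; omega),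
      show s.toNat + 1 + rest.length - (List.take s.toNat seq).length = rest.length + 1 from by simp; omega,
      List.drop_succ_cons, List.drop_drop]
    simp
  rw [e1, e2]
  simp [hm, List.append_assoc]

def stepA (words : List String) (slot_sequence : List String) (p : String × String) : List String :=
  if p.2 ≠ "" then
    let slot_words := PySem.Str.split₀ p.2
    let start_index := find_sublist_index slot_words words 0
    if start_index ≠ -1 then
      let seq1 := pySetItem slot_sequence start_index ("B-" ++ p.1)
      (PySem.List.pyRange (start_index + 1) (start_index + (slot_words.length : Int))).foldl
        (fun sq i => pySetItem sq i ("I-" ++ p.1)) seq1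
    else slot_sequence
  else slot_sequence

def stepB (words : List String) (slot_sequence : List String) (p : String × String) : List String :=
  match PySem.Str.split₀ p.2 with
  | [] => slot_sequence
  | w :: rest =>
    let m := (w :: rest).length
    match ((posDict words).getD w []).find?
        (fun i => PySem.List.slice words (some i) (some (i + (m : Int))) == w :: rest) with
    | none => slot_sequence
    | some i =>
      PySem.List.slice slot_sequence none (some i)
        ++ (("B-" ++ p.1) :: List.replicate (m - 1) ("I-" ++ p.1))
        ++ PySem.List.slice slot_sequence (some (i + (m : Int))) none

theorem stepB_len (words : List String) (p : String × String) (seq : List String)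
    (hlen : seq.length = words.length) : (stepB words seq p).length = words.length := by
  unfold stepB
  cases hsw : PySem.Str.split₀ p.2 with
  | nil => exact hlen
  | cons w rest =>
    simp only
    cases hfind : ((posDict words).getD w []).find?
        (fun i => PySem.List.slice words (some i) (some (i + (((w :: rest).length : Nat) : Int))) == w :: rest) with
    | none => exact hlen
    | some s =>
      have hP := List.find?_some hfind
      have hmem := List.mem_of_find?_eq_some hfind
      have hs0 : 0 ≤ s := by
        rw [posDict_getD] at hmem
        unfold candList at hmem
        simp only [List.mem_map, List.mem_filter, List.mem_range] at hmem
        obtain ⟨k, _, hk⟩ := hmem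
        omega
      rw [beq_iff_eq] at hP
      obtain ⟨hbound, _⟩ := slice_hit words w rest s hs0 hP
      simp only
      rw [PySem.List.slice_to _ hs0]
      rw [show (s + (((w :: rest).length : Nat) : Int)) = ((s.toNat + (w :: rest).length : Nat) : Int) from by simp; omega]
      rw [PySem.List.slice_from _ (by omega : (0:Int) ≤ ((s.toNat + (w :: rest).length : Nat) : Int))]
      rw [Int.toNat_natCast]
      simp only [List.length_append, List.length_take, List.length_cons, List.length_replicate,
        List.length_drop]
      simp at hbound ⊢
      omega

theorem step_eq (words : List String) (p : String × String) (seq : List String)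
    (hlen : seq.length = words.length)
    (hok : p.2 ≠ "" → PySem.Str.split₀ p.2 ≠ []) :
    stepA words seq p = stepB words seq p := by
  by_cases hv : p.2 = ""
  · have h0 : PySem.Str.split₀ "" = [] := by decide
    simp [stepA, stepB, hv, h0]
  · unfold stepA stepB
    rw [if_pos hv]
    cases hsw : PySem.Str.split₀ p.2 with
    | nil => exact absurd hsw (hok hv)
    | cons w rest =>
      simp only
      rw [start_eq words w rest]
      cases hfind : ((posDict words).getD w []).find?
          (fun i => PySem.List.slice words (some i) (some (i + (((w :: rest).length : Nat) : Int))) == w :: rest) with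
      | none =>
        simp
      | some s =>
        simp only [Option.getD_some]
        have hP := List.find?_some hfind
        have hmem := List.mem_of_find?_eq_some hfind
        have hs0 : 0 ≤ s := by
          rw [posDict_getD] at hmem
          unfold candList at hmem
          simp only [List.mem_map, List.mem_filter, List.mem_range] at hmem
          obtain ⟨k, _, hk⟩ := hmem
          omega
        rw [if_pos (by omega : s ≠ -1)]
        rw [beq_iff_eq] at hP
        obtain ⟨hbound, _⟩ := slice_hit words w rest s hs0 hP
        exact tagged_eq words seq w rest ("B-" ++ p.1) ("I-" ++ p.1) s hs0 hlen hbound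

theorem fold_eq (words : List String) : ∀ (l : List (String × String)) (seq : List String),
    seq.length = words.length →
    (∀ p ∈ l, p.2 ≠ "" → PySem.Str.split₀ p.2 ≠ []) →
    l.foldl (stepA words) seq = l.foldl (stepB words) seq := by
  intro l
  induction l with
  | nil => intro seq _ _; rfl
  | cons q t ih =>
    intro seq hlen hok
    have hAB := step_eq words q seq hlen (hok q (List.mem_cons_self))
    simp only [List.foldl_cons, hAB]
    exact ih _ (stepB_len words q seq hlen) (fun p hp => hok p (List.mem_cons_of_mem _ hp))

theorem main_eq (entity_slots : List (String × String)) (sentence : String)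
    (hok : ∀ p ∈ entity_slots, p.2 ≠ "" → PySem.Str.split₀ p.2 ≠ []) :
    convert_dict_to_slots_old entity_slots sentence = convert_dict_to_slots_old_alt entity_slots sentence := by
  have hA : convert_dict_to_slots_old entity_slots sentence
      = entity_slots.foldl (stepA (PySem.Str.split₀ sentence))
          (List.replicate (PySem.Str.split₀ sentence).length "O") := rfl
  have hB : convert_dict_to_slots_old_alt entity_slots sentence
      = entity_slots.foldl (stepB (PySem.Str.split₀ sentence))
          (List.replicate (PySem.Str.split₀ sentence).length "O") := rfl
  rw [hA, hB]
  exact fold_eq _ _ _ (by simp) hok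

-- ===== lemmas for the tightness theorem =====

theorem empty_pat (words : List String) : find_sublist_index [] words 0 = 0 := by
  unfold find_sublist_index
  have h1 : (words.length : Int) - (([] : List String).length : Int) + 1 = (words.length : Int) + 1 := by
    simp
  rw [h1, PySem.List.pyRange_one_cons (by omega : (0:Int) < (words.length : Int) + 1)]
  rw [List.find?_cons_of_pos (by
    have h0 : (0 : Int) + (([] : List String).length : Int) = ((0 : Nat) : Int) := by simp
    simp only [h0]
    rw [show ((0:Int)) = ((0 : Nat) : Int) from rfl, PySem.List.slice_natCast]
    simp)]

theorem split_empty : PySem.Str.split₀ "" = [] := by decide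

theorem ne_empty_of_split_cons (p : String × String) (w : String) (rest : List String)
    (hsw : PySem.Str.split₀ p.2 = w :: rest) : p.2 ≠ "" := by
  intro h
  rw [h, split_empty] at hsw
  exact absurd hsw (by simp)

-- the first-word index never misses a prefix phrase: it is candidate 0, checked first
theorem find_prefix (words : List String) (w : String) (rest : List String)
    (hpre : (w :: rest) <+: words) :
    ((posDict words).getD w []).find?
      (fun i => PySem.List.slice words (some i) (some (i + (((w :: rest).length : Nat) : Int))) == w :: rest) = some 0 := by
  rw [posDict_getD]
  obtain ⟨t2, ht2⟩ := hpre
  have hlen : (w :: rest).length ≤ words.length := by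
    rw [← ht2]; simp
  have hget : words.getD 0 "" = w := by rw [← ht2]; rfl
  obtain ⟨n', hn'⟩ : ∃ n', words.length = n' + 1 := ⟨words.length - 1, by simp at hlen; omega⟩
  have hcand : ∃ tl, candList words w = (0 : Int) :: tl := by
    unfold candList
    rw [hn', List.range_succ_eq_map, List.filter_cons,
      if_pos (by simpa using hget)]
    exact ⟨_, rfl⟩
  obtain ⟨tl, htl⟩ := hcand
  rw [htl]
  rw [List.find?_cons_of_pos]
  rw [show ((0:Int) + (((w :: rest).length : Nat) : Int)) = (((0 + (w :: rest).length : Nat)) : Int) by push_cast; ring,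
    show ((0:Int)) = ((0 : Nat) : Int) from rfl, PySem.List.slice_natCast]
  simp only [List.drop_zero, Nat.sub_zero, Nat.zero_add]
  rw [show words.take (w :: rest).length = w :: rest from by
    rw [← ht2]; exact List.take_left]
  simp

-- facts extracted from a successful candidate search
theorem F_some_facts (words : List String) (w : String) (rest : List String) (s : Int)
    (hF : ((posDict words).getD w []).find?
      (fun i => PySem.List.slice words (some i) (some (i + (((w :: rest).length : Nat) : Int))) == w :: rest) = some s) :
    0 ≤ s ∧ s.toNat + (w :: rest).length ≤ words.length ∧ (s = 0 → (w :: rest) <+: words) := by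
  have hP := List.find?_some hF
  have hmem := List.mem_of_find?_eq_some hF
  have hs0 : 0 ≤ s := by
    rw [posDict_getD] at hmem
    unfold candList at hmem
    simp only [List.mem_map, List.mem_filter, List.mem_range] at hmem
    obtain ⟨k, _, hk⟩ := hmem
    omega
  rw [beq_iff_eq] at hP
  obtain ⟨hbound, _⟩ := slice_hit words w rest s hs0 hP
  refine ⟨hs0, hbound, ?_⟩
  intro h0
  subst h0
  rw [show ((0:Int) + (((w :: rest).length : Nat) : Int)) = (((0 + (w :: rest).length : Nat)) : Int) by push_cast; ring,
    show ((0:Int)) = ((0 : Nat) : Int) from rfl, PySem.List.slice_natCast] at hP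
  simp only [List.drop_zero, Nat.sub_zero, Nat.zero_add] at hP
  rw [← hP]
  exact List.take_prefix _ _

-- the common write both programs perform at a found start position
def spliceN (st : List String) (k : Nat) (bt it : String) (m : Nat) : List String :=
  st.take k ++ (bt :: List.replicate (m - 1) it) ++ st.drop (k + m)

theorem spliceN_length (st : List String) (k : Nat) (bt it : String) (m : Nat)
    (h : k + m ≤ st.length) (hm : 1 ≤ m) : (spliceN st k bt it m).length = st.length := by
  simp [spliceN]
  omega

theorem spliceN_cons_zero (h : String) (t : List String) (bt it : String) (m : Nat) (hm : 1 ≤ m) :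
    spliceN (h :: t) 0 bt it m = bt :: (List.replicate (m - 1) it ++ t.drop (m - 1)) := by
  unfold spliceN
  rw [show 0 + m = (m - 1) + 1 by omega]
  simp

theorem spliceN_cons_pos (h : String) (t : List String) (k : Nat) (bt it : String) (m : Nat) :
    spliceN (h :: t) (k + 1) bt it m = h :: spliceN t k bt it m := by
  unfold spliceN
  rw [show k + 1 + m = (k + m) + 1 by omega]
  simp

theorem splice_eq_spliceN (st : List String) (s : Int) (hs0 : 0 ≤ s) (bt it : String) (m : Nat) :
    PySem.List.slice st none (some s) ++ (bt :: List.replicate (m - 1) it)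
        ++ PySem.List.slice st (some (s + (m : Int))) none
      = spliceN st s.toNat bt it m := by
  rw [PySem.List.slice_to _ hs0,
    show (s + (m : Int)) = ((s.toNat + m : Nat) : Int) by omega,
    PySem.List.slice_from _ (by omega : (0:Int) ≤ ((s.toNat + m : Nat) : Int)),
    Int.toNat_natCast]
  rfl

theorem stepA_skip (words : List String) (st : List String) (p : String × String)
    (hv : p.2 = "") : stepA words st p = st := by
  simp [stepA, hv]

theorem stepA_wordless (words : List String) (h : String) (t : List String) (p : String × String)
    (hv : p.2 ≠ "") (hsw : PySem.Str.split₀ p.2 = []) :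
    stepA words (h :: t) p = ("B-" ++ p.1) :: t := by
  unfold stepA
  rw [if_pos hv]
  simp only [hsw, empty_pat, List.length_nil, Nat.cast_zero, add_zero]
  rw [if_pos (by decide : (0 : Int) ≠ -1)]
  rw [PySem.List.pyRange_one_eq_nil (by omega : (0:Int) ≤ 0 + 1)]
  simp only [List.foldl_nil]
  rw [show (0:Int) = ((0:Nat) : Int) from rfl, pySetItem_natCast _ _ _ (by simp)]
  rfl

theorem stepB_wordless (words : List String) (st : List String) (p : String × String)
    (hsw : PySem.Str.split₀ p.2 = []) : stepB words st p = st := by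
  unfold stepB
  rw [hsw]

theorem stepA_none (words : List String) (st : List String) (p : String × String)
    (w : String) (rest : List String) (hsw : PySem.Str.split₀ p.2 = w :: rest)
    (hF : ((posDict words).getD w []).find?
      (fun i => PySem.List.slice words (some i) (some (i + (((w :: rest).length : Nat) : Int))) == w :: rest) = none) :
    stepA words st p = st := by
  have hv : p.2 ≠ "" := ne_empty_of_split_cons p w rest hsw
  unfold stepA
  rw [if_pos hv]
  simp only [hsw, start_eq, hF]
  simp

theorem stepB_none (words : List String) (st : List String) (p : String × String)
    (w : String) (rest : List String) (hsw : PySem.Str.split₀ p.2 = w :: rest)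
    (hF : ((posDict words).getD w []).find?
      (fun i => PySem.List.slice words (some i) (some (i + (((w :: rest).length : Nat) : Int))) == w :: rest) = none) :
    stepB words st p = st := by
  unfold stepB
  rw [hsw]
  simp only [hF]

theorem stepA_some (words : List String) (st : List String) (p : String × String)
    (w : String) (rest : List String) (s : Int)
    (hsw : PySem.Str.split₀ p.2 = w :: rest) (hlen : st.length = words.length)
    (hF : ((posDict words).getD w []).find?
      (fun i => PySem.List.slice words (some i) (some (i + (((w :: rest).length : Nat) : Int))) == w :: rest) = some s) :
    stepA words st p = spliceN st s.toNat ("B-" ++ p.1) ("I-" ++ p.1) (w :: rest).length := by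
  obtain ⟨hs0, hbound, -⟩ := F_some_facts words w rest s hF
  have hv : p.2 ≠ "" := ne_empty_of_split_cons p w rest hsw
  unfold stepA
  rw [if_pos hv]
  simp only [hsw, start_eq, hF, Option.getD_some]
  rw [if_pos (by omega : s ≠ -1)]
  rw [tagged_eq words st w rest ("B-" ++ p.1) ("I-" ++ p.1) s hs0 hlen hbound]
  exact splice_eq_spliceN st s hs0 _ _ _

theorem stepB_some (words : List String) (st : List String) (p : String × String)
    (w : String) (rest : List String) (s : Int)
    (hsw : PySem.Str.split₀ p.2 = w :: rest)
    (hF : ((posDict words).getD w []).find?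
      (fun i => PySem.List.slice words (some i) (some (i + (((w :: rest).length : Nat) : Int))) == w :: rest) = some s) :
    stepB words st p = spliceN st s.toNat ("B-" ++ p.1) ("I-" ++ p.1) (w :: rest).length := by
  obtain ⟨hs0, -, -⟩ := F_some_facts words w rest s hF
  unfold stepB
  rw [hsw]
  simp only [hF]
  exact splice_eq_spliceN st s hs0 _ _ _

-- the value each program leaves at word position 0, read off the slot list
def headUpd (f : String × String → Bool) (l : List (String × String)) (h0 : String) : String :=
  l.foldl (fun h p => if f p then "B-" ++ p.1 else h) h0

theorem headUpd_last (f : String × String → Bool) :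
    ∀ (l : List (String × String)) (h0 : String),
    headUpd f l h0 = match (l.filter f).getLast? with
      | none => h0
      | some p => "B-" ++ p.1 := by
  intro l
  induction l with
  | nil => intro h0; rfl
  | cons p l ih =>
    intro h0
    by_cases hp : f p = true
    · have : headUpd f (p :: l) h0 = headUpd f l ("B-" ++ p.1) := by
        simp [headUpd, hp]
      rw [this, ih, List.filter_cons, if_pos hp]
      rw [List.getLast?_cons]
      cases (l.filter f).getLast? with
      | none => rfl
      | some q => rfl
    · have : headUpd f (p :: l) h0 = headUpd f l h0 := by
        simp [headUpd, hp]
      rw [this, ih, List.filter_cons, if_neg hp]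

-- parallel characterisation of both folds: equal tails, heads given by headUpd
theorem fold_heads (words : List String) :
    ∀ (l : List (String × String)) (hA hB : String) (t : List String),
    t.length + 1 = words.length →
    ∃ t', t'.length + 1 = words.length ∧
      l.foldl (stepA words) (hA :: t) = headUpd (pvWrites0 words) l hA :: t' ∧
      l.foldl (stepB words) (hB :: t) = headUpd (pvPhrasePrefix words) l hB :: t' := by
  intro l
  induction l with
  | nil =>
    intro hA hB t ht
    exact ⟨t, ht, rfl, rfl⟩
  | cons p l ih =>
    intro hA hB t ht
    have hW : headUpd (pvWrites0 words) (p :: l) hA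
        = headUpd (pvWrites0 words) l (if pvWrites0 words p then "B-" ++ p.1 else hA) := rfl
    have hP : headUpd (pvPhrasePrefix words) (p :: l) hB
        = headUpd (pvPhrasePrefix words) l (if pvPhrasePrefix words p then "B-" ++ p.1 else hB) := rfl
    simp only [List.foldl_cons, hW, hP]
    cases hsw : PySem.Str.split₀ p.2 with
    | nil =>
      have hppf : pvPhrasePrefix words p = false := by
        simp [pvPhrasePrefix, hsw]
      by_cases hv : p.2 = ""
      · have hwf : pvWrites0 words p = false := by
          simp [pvWrites0, hv]
        rw [stepA_skip words _ p hv, stepB_wordless words _ p hsw, hwf, hppf]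
        simpa using ih hA hB t ht
      · have hwt : pvWrites0 words p = true := by
          simp [pvWrites0, hv, hsw]
        rw [stepA_wordless words hA t p hv hsw, stepB_wordless words _ p hsw, hwt, hppf]
        simpa using ih ("B-" ++ p.1) hB t ht
    | cons w rest =>
      cases hF : ((posDict words).getD w []).find?
          (fun i => PySem.List.slice words (some i) (some (i + (((w :: rest).length : Nat) : Int))) == w :: rest) with
      | none =>
        have hnp : ¬ (w :: rest) <+: words := by
          intro hpre
          rw [find_prefix words w rest hpre] at hF
          exact absurd hF (by simp)
        have hppf : pvPhrasePrefix words p = false := by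
          simp [pvPhrasePrefix, hsw, Bool.eq_false_iff, List.isPrefixOf_iff_prefix, hnp]
        have hwf : pvWrites0 words p = false := by
          simp [pvWrites0, hsw, hppf]
        rw [stepA_none words _ p w rest hsw hF, stepB_none words _ p w rest hsw hF, hppf, hwf]
        simpa using ih hA hB t ht
      | some s =>
        obtain ⟨hs0, hbound, h0pre⟩ := F_some_facts words w rest s hF
        have hlenA : (hA :: t).length = words.length := by simp; omega
        rw [stepA_some words _ p w rest s hsw hlenA hF, stepB_some words _ p w rest s hsw hF]
        rcases hk : s.toNat with _ | k
        · -- start 0: the phrase is a prefix; both write the same head and tail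
          have hpre : (w :: rest) <+: words := h0pre (by omega)
          have hppt : pvPhrasePrefix words p = true := by
            simp [pvPhrasePrefix, hsw, List.isPrefixOf_iff_prefix, hpre]
          have hwt : pvWrites0 words p = true := by
            have hv : p.2 ≠ "" := ne_empty_of_split_cons p w rest hsw
            simp [pvWrites0, hv, hppt]
          rw [spliceN_cons_zero _ _ _ _ _ (by simp), spliceN_cons_zero _ _ _ _ _ (by simp)]
          rw [hppt, hwt]
          have hm : (w :: rest).length = rest.length + 1 := rfl
          have ht' : (List.replicate ((w :: rest).length - 1) ("I-" ++ p.1) ++ t.drop ((w :: rest).length - 1)).length + 1 = words.length := by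
            simp only [List.length_append, List.length_replicate, List.length_drop]
            omega
          simpa using ih ("B-" ++ p.1) ("B-" ++ p.1) _ ht'
        · -- start ≥ 1: the head is untouched, the phrase is not a prefix
          have hnp : ¬ (w :: rest) <+: words := by
            intro hpre
            rw [find_prefix words w rest hpre] at hF
            have : s = 0 := by injection hF.symm
            omega
          have hppf : pvPhrasePrefix words p = false := by
            simp [pvPhrasePrefix, hsw, Bool.eq_false_iff, List.isPrefixOf_iff_prefix, hnp]
          have hwf : pvWrites0 words p = false := by
            simp [pvWrites0, hsw, hppf]
          rw [spliceN_cons_pos, spliceN_cons_pos, hppf, hwf]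
          have hm : (w :: rest).length = rest.length + 1 := rfl
          have ht' : (spliceN t k ("B-" ++ p.1) ("I-" ++ p.1) (w :: rest).length).length + 1 = words.length := by
            rw [spliceN_length _ _ _ _ _ (by omega) (by simp)]
            omega
          simpa using ih hA hB _ ht'

-- a prefix-phrase slot is in particular a position-0 writer
theorem prefix_writes (words : List String) (p : String × String)
    (h : pvPhrasePrefix words p = true) : pvWrites0 words p = true := by
  have hsp : PySem.Str.split₀ p.2 ≠ [] := by
    simp only [pvPhrasePrefix, Bool.and_eq_true, bne_iff_ne, ne_eq] at h
    exact h.1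
  have hv : p.2 ≠ "" := by
    intro he; rw [he, split_empty] at hsp; exact hsp rfl
  simp [pvWrites0, hv, h]

theorem filter_P_eq (words : List String) (es : List (String × String)) :
    es.filter (pvPhrasePrefix words)
      = (es.filter (pvWrites0 words)).filter (pvPhrasePrefix words) := by
  rw [List.filter_filter]
  apply List.filter_congr
  intro a _
  cases hpa : pvPhrasePrefix words a with
  | false => simp
  | true => simp [prefix_writes words a hpa]

theorem tag_ne_O (x : String) : "B-" ++ x ≠ "O" := by
  intro h
  have h2 := congrArg String.toList h
  rw [String.toList_append] at h2
  have := congrArg List.length h2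
  simp at this

theorem tag_inj (x y : String) (h : "B-" ++ x = "B-" ++ y) : x = y := by
  have h2 := congrArg String.toList h
  rw [String.toList_append, String.toList_append] at h2
  have h3 := List.append_cancel_left h2
  exact String.toList_inj.mp h3

-- ===== VERDICT (by name: the statements are the Claim_ definitions above) =====
theorem convert_dict_to_slots_old_spec : Claim_unchanged_convert_dict_to_slots_old := by
  intro es sen _ hpre hnd
  by_cases hs : PySem.Str.split₀ sen = []
  · exact main_eq es sen (fun p hp hv => hpre.2 hs p hp hv)
  · set words := PySem.Str.split₀ sen with hwords
    obtain ⟨w₀, ws, hws⟩ : ∃ w₀ ws, words = w₀ :: ws := by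
      cases h : words with
      | nil => exact absurd h hs
      | cons a b => exact ⟨a, b, rfl⟩
    have hinit : List.replicate words.length "O" = "O" :: List.replicate ws.length "O" := by
      rw [hws]; rfl
    obtain ⟨t', -, hA, hB⟩ := fold_heads words es "O" "O" (List.replicate ws.length "O")
      (by rw [hws]; simp)
    have hheads : headUpd (pvWrites0 words) es "O" = headUpd (pvPhrasePrefix words) es "O" := by
      rw [headUpd_last, headUpd_last]
      cases hlast : (es.filter (pvWrites0 words)).getLast? with
      | none =>
        have hnil : es.filter (pvWrites0 words) = [] := List.getLast?_eq_none_iff.mp hlast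
        rw [filter_P_eq words es, hnil]
        rfl
      | some p =>
        have hsp : PySem.Str.split₀ p.2 ≠ [] := by
          intro hw0
          exact hnd ⟨hs, by rw [hlast]; simp [hw0]⟩
        have hpW : pvWrites0 words p = true := by
          have := List.mem_of_getLast? hlast
          exact (List.mem_filter.mp this).2
        have hpP : pvPhrasePrefix words p = true := by
          simp only [pvWrites0, Bool.and_eq_true, Bool.or_eq_true, beq_iff_eq] at hpW
          rcases hpW.2 with h | h
          · exact absurd h hsp
          · exact h
        obtain ⟨l₁, hl₁⟩ := List.getLast?_eq_some_iff.mp hlast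
        have hlastP : (es.filter (pvPhrasePrefix words)).getLast? = some p := by
          rw [filter_P_eq words es, hl₁, List.filter_append]
          rw [show List.filter (pvPhrasePrefix words) [p] = [p] by simp [hpP]]
          exact List.getLast?_concat
        rw [hlastP]
    show es.foldl (stepA words) (List.replicate words.length "O")
        = es.foldl (stepB words) (List.replicate words.length "O")
    rw [hinit, hA, hB, hheads]

theorem convert_dict_to_slots_old_changed : Claim_changed_convert_dict_to_slots_old := by
  unfold Claim_changed_convert_dict_to_slots_old; decide

theorem convert_dict_to_slots_old_tight : Claim_exact_convert_dict_to_slots_old := by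
  intro es sen _ hpre hD heq
  obtain ⟨hw, hany⟩ := hD
  set words := PySem.Str.split₀ sen with hwords
  cases hlast : (es.filter (pvWrites0 words)).getLast? with
  | none => rw [hlast] at hany; exact absurd hany (by simp)
  | some p₀ =>
    rw [hlast] at hany
    simp only [Option.any_some, beq_iff_eq] at hany
    have hp₀mem : p₀ ∈ es := (List.mem_filter.mp (List.mem_of_getLast? hlast)).1
    obtain ⟨w₀, ws, hws⟩ : ∃ w₀ ws, words = w₀ :: ws := by
      cases h : words with
      | nil => exact absurd h hw
      | cons a b => exact ⟨a, b, rfl⟩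
    have hinit : List.replicate words.length "O" = "O" :: List.replicate ws.length "O" := by
      rw [hws]; rfl
    obtain ⟨t', -, hA, hB⟩ := fold_heads words es "O" "O" (List.replicate ws.length "O")
      (by rw [hws]; simp)
    have heqA : convert_dict_to_slots_old es sen
        = headUpd (pvWrites0 words) es "O" :: t' := by
      show es.foldl (stepA words) (List.replicate words.length "O") = _
      rw [hinit]; exact hA
    have heqB : convert_dict_to_slots_old_alt es sen
        = headUpd (pvPhrasePrefix words) es "O" :: t' := by
      show es.foldl (stepB words) (List.replicate words.length "O") = _
      rw [hinit]; exact hB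
    rw [heqA, heqB] at heq
    have hhead : headUpd (pvWrites0 words) es "O" = headUpd (pvPhrasePrefix words) es "O" := by
      injection heq
    rw [headUpd_last, headUpd_last, hlast] at hhead
    cases hlastP : (es.filter (pvPhrasePrefix words)).getLast? with
    | none =>
      rw [hlastP] at hhead
      exact tag_ne_O p₀.1 hhead
    | some q =>
      rw [hlastP] at hhead
      have hqmem := List.mem_of_getLast? hlastP
      rw [List.mem_filter] at hqmem
      obtain ⟨hqes, hqpre⟩ := hqmem
      have hqsp : PySem.Str.split₀ q.2 ≠ [] := by
        simp only [pvPhrasePrefix, Bool.and_eq_true, bne_iff_ne, ne_eq] at hqpre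
        exact hqpre.1
      have hqne : q ≠ p₀ := by
        intro h; rw [h, hany] at hqsp; exact hqsp rfl
      have hkeys : q.1 = p₀.1 := (tag_inj _ _ hhead).symm
      exact hqne (List.inj_on_of_nodup_map hpre.1 hqes hp₀mem hkeys)
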